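-- pv_equiv track=rewrite | github.com/mathmart-AI/MCP-migration-automation | Axon.MCP.Server/src/extractors/api_extractor.py | _combine_routes
-- ===== SOURCE A (Python) =====
-- def _combine_routes(base_route: str, method_route: str) -> str:
--     """Combine base and method routes."""
--     if not base_route:
--         base_route = ""
--     if not method_route:
--         method_route = ""
--
--     # Ensure proper slashes
--     if base_route and not base_route.startswith('/'):
--         base_route = '/' + base_route
--
--     if method_route and not method_route.startswith('/'):
--         method_route = '/' + method_route
--
--     # Combine
--     full_route = base_route + method_route
--
--     # Clean up double slashes
--     while '//' in full_route:
--         full_route = full_route.replace('//', '/')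
--
--     return full_route if full_route else '/'
-- ===== SOURCE B (Python) =====
-- def _combine_routes(base_route: str, method_route: str) -> str:
--     """Combine base and method routes (single-pass slash collapse)."""
--     out = []
--     for seg in (base_route, method_route):
--         if seg and not seg.startswith('/'):
--             seg = '/' + seg
--         for c in seg:
--             if c != '/' or not out or out[-1] != '/':
--                 out.append(c)
--     return ''.join(out) if out else '/'
-- ===== Notes on version B (the rewrite author's own statement) =====
-- stated objective: alternative
-- what changed: The repeated whole-string replace('//','/') rescan loop is replaced by one left-to-right pass that emits each character except a '/' immediately following an emitted '/', collapsing slash runs in a single traversal.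
import Mathlib
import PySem

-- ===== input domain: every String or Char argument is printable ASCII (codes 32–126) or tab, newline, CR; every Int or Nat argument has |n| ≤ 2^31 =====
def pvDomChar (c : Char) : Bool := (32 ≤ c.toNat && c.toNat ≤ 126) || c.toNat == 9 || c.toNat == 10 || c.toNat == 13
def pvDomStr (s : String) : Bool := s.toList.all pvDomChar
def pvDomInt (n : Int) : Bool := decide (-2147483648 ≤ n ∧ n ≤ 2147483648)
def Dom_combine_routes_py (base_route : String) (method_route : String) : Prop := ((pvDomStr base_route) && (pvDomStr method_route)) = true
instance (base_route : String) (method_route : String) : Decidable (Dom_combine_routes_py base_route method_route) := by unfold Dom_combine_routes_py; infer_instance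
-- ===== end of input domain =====

-- B replaces A's repeated replace('//','/') rescans with one left-to-right pass that skips a '/' after an emitted '/'.

-- ===== PORT A =====

-- structural form of Python's s.replace('//','/') on char lists (proved equal to PySem.Chars.replace below)
def rep1 : List Char → List Char
  | [] => []
  | [c] => [c]
  | c :: d :: t => if c == '/' && d == '/' then '/' :: rep1 t else c :: rep1 (d :: t)

theorem rep1_length_le (l : List Char) : (rep1 l).length ≤ l.length := by
  fun_induction rep1 l with
  | case1 => exact Nat.le_refl _
  | case2 => exact Nat.le_refl _
  | case3 c d t h ih => simp only [List.length_cons]; omega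
  | case4 c d t h ih => simp only [List.length_cons] at ih ⊢; omega

theorem rep1_length_lt (l : List Char) (h : ['/', '/'] <:+: l) : (rep1 l).length < l.length := by
  fun_induction rep1 l with
  | case1 => simp at h
  | case2 c =>
      have h2 : (2 : Nat) ≤ 1 := h.length_le
      omega
  | case3 c d t hcd ih =>
      have := rep1_length_le t
      simp only [List.length_cons]; omega
  | case4 c d t hcd ih =>
      have h' : ['/', '/'] <:+: (d :: t) := by
        rcases (List.infix_cons_iff.mp h) with hp | hs
        · exfalso
          rcases hp with ⟨r, hr⟩
          injection hr with h1 hr2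
          injection hr2 with h2 hr3
          exact absurd (by rw [← h1, ← h2]; decide) hcd
        · exact hs
      have := ih h'
      simp only [List.length_cons] at this ⊢; omega

theorem replace_go_eq (fuel : Nat) (l acc : List Char) (h : l.length ≤ fuel) :
    PySem.Chars.replace.go ['/', '/'] ['/'] fuel l acc = acc.reverse ++ rep1 l := by
  induction fuel generalizing l acc with
  | zero =>
      have : l = [] := List.eq_nil_of_length_eq_zero (Nat.le_zero.mp h)
      subst this; simp [PySem.Chars.replace.go, rep1]
  | succ n ih =>
      match l with
      | [] => simp [PySem.Chars.replace.go, rep1]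
      | [c] =>
          have hpre : (List.isPrefixOf ['/', '/'] [c]) = false := by
            simp [List.isPrefixOf]
          simp only [PySem.Chars.replace.go, hpre, Bool.false_eq_true, if_false]
          rw [ih [] (c :: acc) (by simp)]
          simp [rep1]
      | c :: d :: t =>
          by_cases hcd : c = '/' ∧ d = '/'
          · obtain ⟨rfl, rfl⟩ := hcd
            have hpre : List.isPrefixOf ['/', '/'] ('/' :: '/' :: t) = true := by
              simp
            simp only [PySem.Chars.replace.go, hpre, if_pos]
            rw [show List.drop ['/', '/'].length ('/' :: '/' :: t) = t from rfl]
            rw [ih t (['/'].reverse ++ acc) (by simp at h ⊢; omega)]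
            simp [rep1]
          · have hpre : (List.isPrefixOf ['/', '/'] (c :: d :: t)) = false := by
              rw [Bool.eq_false_iff]
              intro hp
              have hpp := List.isPrefixOf_iff_prefix.mp hp
              rw [List.cons_prefix_cons, List.cons_prefix_cons] at hpp
              exact hcd ⟨hpp.1.symm, hpp.2.1.symm⟩
            simp only [PySem.Chars.replace.go, hpre, Bool.false_eq_true, if_false]
            rw [ih (d :: t) (c :: acc) (by simp at h ⊢; omega)]
            have : ¬ (c == '/' && d == '/') = true := by
              simp; intro h1 h2; exact hcd ⟨h1, h2⟩
            simp [rep1, this]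

theorem replace_eq_rep1 (l : List Char) :
    PySem.Chars.replace l ['/', '/'] ['/'] = rep1 l := by
  rw [PySem.Chars.replace]
  rw [if_neg (by simp)]
  exact replace_go_eq l.length l [] (Nat.le_refl _)

-- the while loop of A: while '//' in full: full = full.replace('//','/')
def loopA (l : List Char) : List Char :=
  if PySem.Chars.isIn ['/', '/'] l = true then loopA (PySem.Chars.replace l ['/', '/'] ['/']) else l
termination_by l.length
decreasing_by
  rw [replace_eq_rep1]
  exact rep1_length_lt l ((PySem.Chars.isIn_iff_infix _ _).mp (by assumption))

def combineA (base_route method_route : List Char) : List Char :=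
  let base_route := if base_route = [] then [] else base_route
  let method_route := if method_route = [] then [] else method_route
  let base_route :=
    if base_route ≠ [] ∧ ¬ (PySem.Chars.startswith base_route ['/'] = true)
    then '/' :: base_route else base_route
  let method_route :=
    if method_route ≠ [] ∧ ¬ (PySem.Chars.startswith method_route ['/'] = true)
    then '/' :: method_route else method_route
  let full_route := base_route ++ method_route
  let full_route := loopA full_route
  if full_route ≠ [] then full_route else ['/']

def combine_routes_py (base_route : String) (method_route : String) : String :=
  String.ofList (combineA base_route.toList method_route.toList)

-- ===== PORT B =====

-- inner loop of Source B: append c unless it is a '/' right after an emitted '/'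
def collapseInto (out : List Char) (seg : List Char) : List Char :=
  seg.foldl
    (fun out c =>
      if c == '/' && !out.isEmpty && (out.getLast? == some '/') then out else out ++ [c])
    out

def normSeg (seg : List Char) : List Char :=
  if seg ≠ [] ∧ ¬ (PySem.Chars.startswith seg ['/'] = true) then '/' :: seg else seg

def combine_routes_py_alt (base_route : String) (method_route : String) : String :=
  let out := [base_route.toList, method_route.toList].foldl
    (fun out seg => collapseInto out (normSeg seg)) []
  if out ≠ [] then String.ofList out else "/"

-- ===== PRECONDITION & SPEC =====
def Spec_combine_routes_py (base_route : String) (method_route : String) (out : String) : Prop := out = combine_routes_py_alt base_route method_route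
instance (base_route : String) (method_route : String) (out : String) : Decidable (Spec_combine_routes_py base_route method_route out) := by unfold Spec_combine_routes_py; infer_instance

-- ===== CLAIM (what is proved, stated in full; the proofs are below) =====
def Claim_equal_combine_routes_py : Prop := ∀ (base_route : String) (method_route : String), Dom_combine_routes_py base_route method_route → Spec_combine_routes_py base_route method_route (combine_routes_py base_route method_route)

-- ===== LEMMAS AND PROOFS =====

-- reference single-pass collapse: Bool = "last emitted char was '/'"
def sqz (b : Bool) : List Char → List Char
  | [] => []
  | c :: t => if b && (c == '/') then sqz b t else c :: sqz (c == '/') t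

theorem collapseInto_eq (seg : List Char) (out : List Char) :
    collapseInto out seg = out ++ sqz (out.getLast? == some '/') seg := by
  induction seg generalizing out with
  | nil => simp [collapseInto, sqz]
  | cons c t ih =>
      have step : collapseInto out (c :: t) =
          collapseInto
            (if c == '/' && !out.isEmpty && (out.getLast? == some '/') then out else out ++ [c])
            t := rfl
      rw [step]
      by_cases hskip : (c == '/' && !out.isEmpty && (out.getLast? == some '/')) = true
      · rw [if_pos hskip, ih out]
        have hb : (out.getLast? == some '/') = true := by
          simp only [Bool.and_eq_true] at hskip; exact hskip.2
        have hc : (c == '/') = true := by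
          simp only [Bool.and_eq_true] at hskip; exact hskip.1.1
        simp [sqz, hb, hc]
      · rw [if_neg hskip, ih (out ++ [c])]
        have hlast : ((out ++ [c]).getLast? == some '/') = (c == '/') := by
          simp
        rw [hlast]
        have hno : ((out.getLast? == some '/') && (c == '/')) = false := by
          cases hgl : (out.getLast? == some '/') with
          | false => simp
          | true =>
            cases hc : (c == '/') with
            | false => simp
            | true =>
              exfalso
              apply hskip
              have hne : out.isEmpty = false := by
                cases out with
                | nil => simp at hgl
                | cons a s => rfl
              simp [hc, hgl, hne]
        simp only [sqz, hno, Bool.false_eq_true, if_false]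
        simp

theorem sq_rep1 (l : List Char) : ∀ b, sqz b (rep1 l) = sqz b l := by
  fun_induction rep1 l with
  | case1 => intro b; rfl
  | case2 c => intro b; rfl
  | case3 c d t hcd ih =>
      intro b
      have hc : c = '/' := by simpa using (by simpa using hcd : c = '/' ∧ d = '/').1
      have hd : d = '/' := by simpa using (by simpa using hcd : c = '/' ∧ d = '/').2
      subst hc; subst hd
      cases b with
      | true => simp [sqz, ih]
      | false => simp [sqz, ih]
  | case4 c d t hcd ih =>
      intro b
      by_cases hskip : (b && (c == '/')) = true
      · simp only [sqz, hskip, if_pos]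
        exact ih b
      · simp only [sqz, hskip, Bool.false_eq_true, if_false]
        rw [ih (c == '/')]
        simp only [sqz]

theorem sq_eq_self (l : List Char) (b : Bool)
    (h : ¬ ['/', '/'] <:+: l) (hb : b = true → l.head? ≠ some '/') : sqz b l = l := by
  induction l generalizing b with
  | nil => rfl
  | cons c t ih =>
      have hskip : (b && (c == '/')) = false := by
        cases b with
        | false => rfl
        | true => simpa using fun hc => (hb rfl) (by simp [hc])
      simp only [sqz, hskip, Bool.false_eq_true, if_false]
      rw [ih _ ?_ ?_]
      · intro hinf; exact h (List.infix_cons_iff.mpr (Or.inr hinf))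
      · intro hc
        have hc' : c = '/' := by simpa using hc
        subst hc'
        intro hhd
        apply h
        cases t with
        | nil => simp at hhd
        | cons d t' =>
            have hd : d = '/' := by simpa using hhd
            subst hd
            exact ⟨[], t', rfl⟩

theorem loopA_eq_sq (l : List Char) : loopA l = sqz false l := by
  fun_induction loopA l with
  | case1 l hin ih =>
      rw [ih, replace_eq_rep1, sq_rep1]
  | case2 l hin =>
      have h : ¬ ['/', '/'] <:+: l := by
        rw [← PySem.Chars.isIn_iff_infix]; simpa using hin
      exact (sq_eq_self l false h (by simp)).symm

theorem collapseInto_append (out s1 s2 : List Char) :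
    collapseInto (collapseInto out s1) s2 = collapseInto out (s1 ++ s2) :=
  (List.foldl_append).symm

-- ===== VERDICT (by name: the statement is the Claim_ definition above) =====
theorem combine_routes_py_spec : Claim_equal_combine_routes_py := by
  intro base_route method_route _
  unfold Spec_combine_routes_py combine_routes_py combine_routes_py_alt combineA normSeg
  have triv : ∀ (x : List Char), (if x = [] then [] else x) = x := by
    intro x; split <;> simp_all
  simp only [List.foldl_cons, List.foldl_nil, triv]
  rw [loopA_eq_sq, collapseInto_append, collapseInto_eq]
  simp only [List.nil_append, List.getLast?_nil,
    show ((none : Option Char) == some '/') = false from rfl]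
  split_ifs <;> rfl
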